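-- pv_equiv track=rewrite | github.com/yuans1121/AAS-UCB-ASTRO121 | Lab 4/data_manipulation.py | find_zeros
-- ===== SOURCE A (Python) =====
-- def find_zeros(spectra):
--     left_zeros = []
--     right_zeros = []
--     for i, power in enumerate(spectra):
--
--         if power == 0:
--             if i < 4096:
--                 left_zeros.extend([i])
--             else:
--                 right_zeros.extend([i])
--
--     return left_zeros, right_zeros
-- ===== SOURCE B (Python) =====
-- def _bisect_left(xs, x):
--     # binary search: first index at which x could be inserted keeping order
--     lo, hi = 0, len(xs)
--     while lo < hi:
--         mid = (lo + hi) // 2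
--         if xs[mid] < x:
--             lo = mid + 1
--         else:
--             hi = mid
--     return lo
--
-- def find_zeros(spectra):
--     zeros = [i for i, power in enumerate(spectra) if power == 0]
--     cut = _bisect_left(zeros, 4096)
--     return zeros[:cut], zeros[cut:]
-- ===== Notes on version B (the rewrite author's own statement) =====
-- stated objective: alternative
-- what changed: B collects all zero indices in one comprehension and then splits the (ascending) list at 4096 by binary search and slicing, instead of branching per element into two accumulators inside the loop.
import Mathlib
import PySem

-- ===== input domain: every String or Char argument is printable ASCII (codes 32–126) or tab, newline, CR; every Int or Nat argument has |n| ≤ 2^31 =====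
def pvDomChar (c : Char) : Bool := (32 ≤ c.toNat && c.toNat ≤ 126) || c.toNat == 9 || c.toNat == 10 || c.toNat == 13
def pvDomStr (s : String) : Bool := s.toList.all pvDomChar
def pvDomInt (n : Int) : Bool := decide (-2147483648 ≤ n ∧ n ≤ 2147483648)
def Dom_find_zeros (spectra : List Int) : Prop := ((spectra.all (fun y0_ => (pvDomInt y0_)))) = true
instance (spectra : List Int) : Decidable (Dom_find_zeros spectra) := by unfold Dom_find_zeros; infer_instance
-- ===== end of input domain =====

-- B collects the zero indices in one pass and splits the ascending list at 4096 by
-- binary search + slicing, instead of A's per-element branching into two accumulators.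


-- ===== PORT A =====
def find_zeros (spectra : List Int) : List Int × List Int :=
  (PySem.List.enumerate spectra 0).foldl
    (fun acc ip =>
      if ip.2 == 0 then
        if ip.1 < 4096 then (acc.1 ++ [ip.1], acc.2)
        else (acc.1, acc.2 ++ [ip.1])
      else acc)
    ([], [])

-- ===== PORT B =====
-- port of Source B's _bisect_left: lo/hi binary search
def pvBisectLeft (xs : List Int) (x : Int) (lo hi : Nat) : Nat :=
  if _h : lo < hi then
    let mid := (lo + hi) / 2
    if xs.getD mid 0 < x then pvBisectLeft xs x (mid + 1) hi
    else pvBisectLeft xs x lo mid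
  else lo
termination_by hi - lo
decreasing_by all_goals omega

def find_zeros_alt (spectra : List Int) : List Int × List Int :=
  let zeros := (PySem.List.enumerate spectra 0).filterMap
    (fun ip => if ip.2 == 0 then some ip.1 else none)
  let cut := pvBisectLeft zeros 4096 0 zeros.length
  (zeros.take cut, zeros.drop cut)

-- ===== PRECONDITION & SPEC =====
def Spec_find_zeros (spectra : List Int) (out : List Int × List Int) : Prop := out = find_zeros_alt spectra
instance (spectra : List Int) (out : List Int × List Int) : Decidable (Spec_find_zeros spectra out) := by unfold Spec_find_zeros; infer_instance

-- ===== CLAIM (what is proved, stated in full; the proofs are below) =====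
def Claim_equal_find_zeros : Prop := ∀ (spectra : List Int), Dom_find_zeros spectra → Spec_find_zeros spectra (find_zeros spectra)

-- ===== LEMMAS AND PROOFS =====

-- A's loop appends each zero index to the matching side: characterise it by filters.
theorem foldA_filter (ps : List (Int × Int)) :
    ∀ (l r : List Int),
    ps.foldl
      (fun acc ip =>
        if ip.2 == 0 then
          if ip.1 < 4096 then (acc.1 ++ [ip.1], acc.2)
          else (acc.1, acc.2 ++ [ip.1])
        else acc)
      (l, r)
    = (l ++ (ps.filterMap (fun ip => if ip.2 == 0 then some ip.1 else none)).filter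
            (fun i => decide (i < 4096)),
       r ++ (ps.filterMap (fun ip => if ip.2 == 0 then some ip.1 else none)).filter
            (fun i => !decide (i < 4096))) := by
  induction ps with
  | nil => simp
  | cons p ps ih =>
    intro l r
    rw [List.foldl_cons]
    by_cases h0 : (p.2 == 0) = true
    · have h0' : p.2 = 0 := by simpa using h0
      rw [if_pos h0]
      by_cases h1 : p.1 < 4096
      · rw [if_pos h1, ih]
        simp [h0', h1]
      · rw [if_neg h1, ih]
        simp [h0', h1]
    · have h0' : ¬ p.2 = 0 := by simpa using h0
      rw [if_neg h0, ih]
      simp [h0']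

theorem sorted_zeros (spectra : List Int) :
    ((PySem.List.enumerate spectra 0).filterMap
      (fun ip => if ip.2 == 0 then some ip.1 else none)).Pairwise (· < ·) := by
  have h := PySem.List.pairwise_lt_enumerate (xs := spectra) (s := 0)
  refine List.Pairwise.filterMap _ (fun a b hab x hx y hy => ?_) h
  split at hx <;> simp_all

-- on a strictly ascending list, takeWhile (< x) is filter (< x)
theorem takeWhile_eq_filter_of_sorted (x : Int) :
    ∀ (xs : List Int), xs.Pairwise (· < ·) →
      xs.takeWhile (fun i => decide (i < x)) = xs.filter (fun i => decide (i < x)) := by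
  intro xs hs
  induction xs with
  | nil => rfl
  | cons a xs ih =>
    rcases List.pairwise_cons.mp hs with ⟨ha, htl⟩
    by_cases h : a < x
    · simp [h, ih htl]
    · have hall : ∀ b ∈ xs, ¬ (b < x) := fun b hb => by have := ha b hb; omega
      have hnil : List.filter (fun i => decide (i < x)) xs = [] :=
        List.filter_eq_nil_iff.mpr (by intro b hb; simpa using hall b hb)
      simp [h, hnil]

theorem dropWhile_eq_filter_of_sorted (x : Int) :
    ∀ (xs : List Int), xs.Pairwise (· < ·) →
      xs.dropWhile (fun i => decide (i < x)) = xs.filter (fun i => !decide (i < x)) := by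
  intro xs hs
  induction xs with
  | nil => rfl
  | cons a xs ih =>
    rcases List.pairwise_cons.mp hs with ⟨ha, htl⟩
    by_cases h : a < x
    · simp [h, ih htl]
    · have hall : ∀ b ∈ xs, ¬ (b < x) := fun b hb => by have := ha b hb; omega
      have hself : List.filter (fun i => !decide (i < x)) xs = xs :=
        List.filter_eq_self.mpr (by intro b hb; simpa using hall b hb)
      simp [h, hself]

-- elements strictly before the cut satisfy the comparison
theorem getD_lt_of_lt_cut (xs : List Int) (x : Int)
    (i : Nat) (hi : i < (xs.takeWhile (fun z => decide (z < x))).length) :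
    xs.getD i 0 < x := by
  have hpre := List.takeWhile_prefix (l := xs) (p := fun z => decide (z < x))
  have hlen : i < xs.length := lt_of_lt_of_le hi hpre.length_le
  have he := hpre.getElem hi
  have hm := List.mem_takeWhile_imp
    (List.getElem_mem (l := xs.takeWhile (fun z => decide (z < x))) (h := hi))
  have h2 : (xs.takeWhile (fun z => decide (z < x)))[i] < x := by simpa using hm
  rw [List.getD_eq_getElem _ _ hlen]
  exact he ▸ h2

-- elements at or after the cut fail the comparison (needs sortedness)
theorem not_getD_lt_of_cut_le (xs : List Int) (x : Int) (hs : xs.Pairwise (· < ·))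
    (i : Nat) (hci : (xs.takeWhile (fun z => decide (z < x))).length ≤ i)
    (hi : i < xs.length) :
    ¬ xs.getD i 0 < x := by
  set p : Int → Bool := fun z => decide (z < x) with hp
  set c := (xs.takeWhile p).length with hcdef
  have hclen : c < xs.length := lt_of_le_of_lt hci hi
  have hdrop : xs.drop c = xs.dropWhile p := by
    conv_lhs => rw [← List.takeWhile_append_dropWhile (p := p) (l := xs)]
    exact List.drop_left
  have hne : xs.dropWhile p ≠ [] := by
    intro h
    have := congrArg List.length hdrop
    simp [h] at this
    omega
  have hhead := List.head_dropWhile_not p hne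
  have hsome : xs[c]? = some ((xs.dropWhile p).head hne) := by
    have e1 : xs[c]? = (xs.dropWhile p)[0]? := by
      rw [← hdrop, List.getElem?_drop]
      simp
    rw [e1, List.getElem?_eq_getElem (List.length_pos_iff.mpr hne),
      List.head_eq_getElem]
  have hxc : ¬ xs[c] < x := by
    have := List.getElem?_eq_getElem hclen
    rw [hsome] at this
    have heq := Option.some.inj this
    rw [← heq]
    simpa [hp] using hhead
  rw [List.getD_eq_getElem _ _ hi]
  rcases Nat.eq_or_lt_of_le hci with h | h
  · subst h; exact hxc
  · have := (List.pairwise_iff_getElem.mp hs) c i hclen hi h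
    omega

theorem bisect_eq (xs : List Int) (x : Int) (hs : xs.Pairwise (· < ·)) :
    ∀ (lo hi : Nat),
      lo ≤ (xs.takeWhile (fun z => decide (z < x))).length →
      (xs.takeWhile (fun z => decide (z < x))).length ≤ hi →
      hi ≤ xs.length →
      pvBisectLeft xs x lo hi = (xs.takeWhile (fun z => decide (z < x))).length := by
  set c := (xs.takeWhile (fun z => decide (z < x))).length with hcdef
  suffices H : ∀ n lo hi, hi - lo = n → lo ≤ c → c ≤ hi → hi ≤ xs.length →
      pvBisectLeft xs x lo hi = c by
    exact fun lo hi h1 h2 h3 => H _ lo hi rfl h1 h2 h3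
  intro n
  induction n using Nat.strong_induction_on with
  | _ n ih =>
    intro lo hi hn h1 h2 h3
    rw [pvBisectLeft]
    split
    · next hlt =>
      by_cases hm : xs.getD ((lo + hi) / 2) 0 < x
      · have hmidc : (lo + hi) / 2 + 1 ≤ c := by
          by_contra hcon
          exact (not_getD_lt_of_cut_le xs x hs ((lo + hi) / 2)
            (by omega) (by omega)) hm
        simp only [hm, if_pos]
        exact ih (hi - ((lo + hi) / 2 + 1)) (by omega) _ _ rfl hmidc h2 h3
      · have hcmid : c ≤ (lo + hi) / 2 := by
          by_contra hcon
          exact hm (getD_lt_of_lt_cut xs x ((lo + hi) / 2) (by omega))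
        simp only [hm, if_false]
        exact ih ((lo + hi) / 2 - lo) (by omega) _ _ rfl h1 hcmid (by omega)
    · next hge => omega

-- ===== VERDICT (by name: the statement is the Claim_ definition above) =====
theorem find_zeros_spec : Claim_equal_find_zeros := by
  intro spectra _
  unfold Spec_find_zeros find_zeros find_zeros_alt
  rw [foldA_filter]
  simp only [List.nil_append]
  have hZ := sorted_zeros spectra
  generalize hG : (PySem.List.enumerate spectra 0).filterMap
      (fun ip => if ip.2 == 0 then some ip.1 else none) = Z at hZ ⊢
  have hpre := List.takeWhile_prefix (l := Z) (p := fun z => decide (z < (4096 : Int)))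
  rw [bisect_eq Z 4096 hZ 0 Z.length (Nat.zero_le _) hpre.length_le le_rfl]
  have htake : Z.take (Z.takeWhile (fun z => decide (z < (4096 : Int)))).length
      = Z.takeWhile (fun z => decide (z < (4096 : Int))) :=
    (List.prefix_iff_eq_take.mp hpre).symm
  have hdrop : Z.drop (Z.takeWhile (fun z => decide (z < (4096 : Int)))).length
      = Z.dropWhile (fun z => decide (z < (4096 : Int))) := by
    have h := List.drop_left (l₁ := Z.takeWhile (fun z => decide (z < (4096 : Int))))
      (l₂ := Z.dropWhile (fun z => decide (z < (4096 : Int))))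
    rwa [List.takeWhile_append_dropWhile] at h
  rw [htake, hdrop, takeWhile_eq_filter_of_sorted 4096 Z hZ,
    dropWhile_eq_filter_of_sorted 4096 Z hZ]
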